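-- pv_equiv track=rewrite | github.com/kkw2238/2017.01-Script-TermProject | ShareFunc.py | MakeaStringtoTime
-- ===== SOURCE A (Python) =====
-- def MakeaStringtoTime(Time) :
--
--     YMDCount = 0
--     YMD = [ "년 " , "월 " , "일 " ]
--     String = ""
--
--     for Char in Time :
--
--         if (Char == '-') or (Char == " ")  :
--             String += YMD[ YMDCount ]
--             YMDCount += 1
--
--         else :
--             String += Char
--
--     return String
-- ===== SOURCE B (Python) =====
-- def MakeaStringtoTime(Time):
--     YMD = ["년 ", "월 ", "일 "]
--     parts = Time.replace(' ', '-').split('-')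
--     result = parts[0]
--     for i, part in enumerate(parts[1:]):
--         result += YMD[i] + part
--     return result
-- ===== Notes on version B (the rewrite author's own statement) =====
-- stated objective: idiomatic
-- what changed: A's character-by-character loop that counts separators and concatenates one char at a time is replaced by a single separator normalisation and split, then a rebuild joining the first part with the indexed unit + part pairs of the remaining parts.
import Mathlib
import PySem

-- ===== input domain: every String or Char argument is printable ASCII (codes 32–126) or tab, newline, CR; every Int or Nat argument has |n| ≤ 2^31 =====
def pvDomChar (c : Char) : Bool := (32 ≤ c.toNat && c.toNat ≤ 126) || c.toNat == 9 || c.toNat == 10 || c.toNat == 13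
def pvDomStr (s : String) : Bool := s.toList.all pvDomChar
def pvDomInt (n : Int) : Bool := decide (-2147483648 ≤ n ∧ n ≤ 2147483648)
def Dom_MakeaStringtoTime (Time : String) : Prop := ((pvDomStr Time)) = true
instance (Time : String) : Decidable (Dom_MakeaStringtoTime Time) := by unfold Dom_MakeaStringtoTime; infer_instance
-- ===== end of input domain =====

-- B replaces A's char-by-char separator-counting loop by replace/split and a rebuild
-- of the parts joined with the indexed Korean units (idiomatic; same O(n) cost).

-- ===== PORT A =====
-- A's YMD list of unit strings (as char lists; strings are handled on the List Char side)
def pvYMD : List (List Char) := [['년', ' '], ['월', ' '], ['일', ' ']]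

-- literal port of A: fold over the characters with state (YMDCount, String);
-- YMD[YMDCount] is PySem.List.pyGet? — `none` is exactly Python's IndexError (excluded by Pre_)
def MakeaStringtoTime (Time : String) : String :=
  let r := Time.toList.foldl
    (fun (st : Option (Int × List Char)) c =>
      st.bind (fun p =>
        if c == '-' || c == ' ' then
          (PySem.List.pyGet? pvYMD p.1).map (fun u => (p.1 + 1, p.2 ++ u))
        else some (p.1, p.2 ++ [c])))
    (some ((0 : Int), ([] : List Char)))
  match r with
  | some p => String.ofList p.2
  | none => ""   -- IndexError: outside Pre_

-- ===== PORT B =====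
def pvYMDalt : List (List Char) := [['년', ' '], ['월', ' '], ['일', ' ']]

-- literal port of Source B: Time.replace(' ','-').split('-'), then parts[0] plus
-- YMD[i] + part for (i, part) in enumerate(parts[1:])
def MakeaStringtoTime_alt (Time : String) : String :=
  let parts := PySem.Chars.splitOn (PySem.Chars.replace Time.toList [' '] ['-']) ['-']
  match parts with
  | [] => ""   -- unreachable: Python's split always yields at least one part (parts[0])
  | p :: rest =>
    let r := (PySem.List.enumerate rest).foldl
      (fun (st : Option (List Char)) ip =>
        st.bind (fun s => (PySem.List.pyGet? pvYMDalt ip.1).map (fun u => s ++ u ++ ip.2)))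
      (some p)
    match r with
    | some s => String.ofList s
    | none => ""   -- IndexError: outside Pre_

-- ===== PRECONDITION & SPEC =====
-- A raises IndexError on the fourth separator character; Pre_ admits exactly the inputs with at most three separators.
def Pre_MakeaStringtoTime (Time : String) : Prop :=
  Time.toList.countP (fun c => c == '-' || c == ' ') ≤ 3
instance (Time : String) : Decidable (Pre_MakeaStringtoTime Time) := by
  unfold Pre_MakeaStringtoTime; infer_instance

def pvWitness_MakeaStringtoTime : String := "2017-01-05"

def Spec_MakeaStringtoTime (Time : String) (out : String) : Prop := out = MakeaStringtoTime_alt Time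
instance (Time : String) (out : String) : Decidable (Spec_MakeaStringtoTime Time out) := by
  unfold Spec_MakeaStringtoTime; infer_instance

-- ===== CLAIM (what is proved, stated in full; the proofs are below) =====
def Claim_equal_MakeaStringtoTime : Prop := ∀ (Time : String), Dom_MakeaStringtoTime Time → Pre_MakeaStringtoTime Time → Spec_MakeaStringtoTime Time (MakeaStringtoTime Time)

-- ===== LEMMAS AND PROOFS =====

-- ' ' → '-' (what Time.replace(' ', '-') does to one char)
def pvRepl (c : Char) : Char := if c == ' ' then '-' else c

-- split of a char list on '-'
def pvParts : List Char → List (List Char)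
  | [] => [[]]
  | c :: t =>
    if c == '-' then [] :: pvParts t
    else match pvParts t with
      | [] => [[c]]
      | p :: ps => (c :: p) :: ps

-- A's output, written as the natural recursion
def pvInter : Nat → List Char → List Char
  | _, [] => []
  | k, c :: t => if c == '-' || c == ' ' then pvYMD.getD k [] ++ pvInter (k + 1) t
                 else c :: pvInter k t

-- B's rebuild of the tail parts, starting at unit index k
def pvGlueRest : Nat → List (List Char) → List Char
  | _, [] => []
  | k, q :: qs => pvYMD.getD k [] ++ q ++ pvGlueRest (k + 1) qs

-- B's rebuild of a full parts list
def pvGlue (k : Nat) : List (List Char) → List Char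
  | [] => []
  | p :: ps => p ++ pvGlueRest k ps

theorem pvParts_ne_nil (l : List Char) : pvParts l ≠ [] := by
  cases l with
  | nil => simp [pvParts]
  | cons c t =>
    simp only [pvParts]
    split
    · simp
    · split <;> simp

theorem pvYMD_get (k : Nat) (hk : k < 3) :
    PySem.List.pyGet? pvYMD (k : Int) = some (pvYMD.getD k []) := by
  interval_cases k <;> decide

theorem foldA_eq (cs : List Char) : ∀ (k : Nat) (s0 : List Char),
    k + cs.countP (fun c => c == '-' || c == ' ') ≤ 3 →
    cs.foldl
      (fun (st : Option (Int × List Char)) c =>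
        st.bind (fun p =>
          if c == '-' || c == ' ' then
            (PySem.List.pyGet? pvYMD p.1).map (fun u => (p.1 + 1, p.2 ++ u))
          else some (p.1, p.2 ++ [c])))
      (some ((k : Int), s0))
    = some (((k + cs.countP (fun c => c == '-' || c == ' ') : Nat) : Int), s0 ++ pvInter k cs) := by
  induction cs with
  | nil => intro k s0 _; simp [pvInter]
  | cons c t ih =>
    intro k s0 h
    by_cases hc : (c == '-' || c == ' ') = true
    · have hcnt : k + (c :: t).countP (fun c => c == '-' || c == ' ')
          = (k + 1) + t.countP (fun c => c == '-' || c == ' ') := by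
        simp [hc]; omega
      have hk3 : k < 3 := by rw [hcnt] at h; omega
      rw [List.foldl_cons]
      simp only [Option.bind_some]
      rw [if_pos hc, pvYMD_get k hk3]
      simp only [Option.map_some]
      have harg : ((k : Int) + 1) = (((k + 1 : Nat)) : Int) := by push_cast; ring
      rw [harg, ih (k + 1) (s0 ++ pvYMD.getD k []) (by rw [hcnt] at h; omega)]
      rw [hcnt]
      simp [pvInter, hc]
    · have hcnt : (c :: t).countP (fun c => c == '-' || c == ' ')
          = t.countP (fun c => c == '-' || c == ' ') := by
        simp [hc]
      rw [List.foldl_cons]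
      simp only [Option.bind_some]
      rw [if_neg hc, ih k (s0 ++ [c]) (by rw [hcnt] at h; omega)]
      simp [pvInter, hc, hcnt]

theorem replace_go_eq (l : List Char) : ∀ (fuel : Nat) (acc : List Char),
    l.length ≤ fuel →
    PySem.Chars.replace.go [' '] ['-'] fuel l acc = acc.reverse ++ l.map pvRepl := by
  induction l with
  | nil => intro fuel acc _; cases fuel <;> simp [PySem.Chars.replace.go]
  | cons c t ih =>
    intro fuel acc hf
    cases fuel with
    | zero => simp at hf
    | succ n =>
      simp only [PySem.Chars.replace.go]
      by_cases hc : c = ' '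
      · rw [if_pos (by simp [hc, List.isPrefixOf])]
        subst hc
        rw [show List.drop [' '].length (' ' :: t) = t from rfl,
            ih n (['-'].reverse ++ acc) (by simp at hf; omega)]
        simp [pvRepl]
      · rw [if_neg (by simp [List.isPrefixOf]; exact fun h => hc h.symm)]
        rw [ih n _ (by simpa using hf)]
        simp [pvRepl, hc]

theorem replace_eq (l : List Char) :
    PySem.Chars.replace l [' '] ['-'] = l.map pvRepl := by
  simp only [PySem.Chars.replace]
  rw [if_neg (by simp), replace_go_eq l l.length [] (le_refl _)]
  simp

-- prepend x onto the first part
def pvConsHead (x : List Char) : List (List Char) → List (List Char)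
  | [] => [x]
  | p :: ps => (x ++ p) :: ps

theorem splitOn_go_eq' (l : List Char) : ∀ (fuel : Nat) (cur : List Char) (acc : List (List Char)),
    l.length ≤ fuel →
    PySem.Chars.splitOn.go ['-'] fuel l cur acc
      = acc.reverse ++ pvConsHead cur.reverse (pvParts l) := by
  induction l with
  | nil =>
    intro fuel cur acc _
    cases fuel <;> simp [PySem.Chars.splitOn.go, pvParts, pvConsHead]
  | cons c t ih =>
    intro fuel cur acc hf
    cases fuel with
    | zero => simp at hf
    | succ n =>
      simp only [PySem.Chars.splitOn.go]
      by_cases hc : c = '-'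
      · rw [if_pos (by simp [hc, List.isPrefixOf])]
        simp only [List.length_cons] at hf
        rw [show (List.drop ['-'].length (c :: t)) = t by simp]
        rw [ih n [] _ (by omega)]
        obtain ⟨p, ps, hps⟩ : ∃ p ps, pvParts t = p :: ps := by
          cases hpt : pvParts t with
          | nil => exact absurd hpt (pvParts_ne_nil t)
          | cons p ps => exact ⟨p, ps, rfl⟩
        simp [pvParts, hc, hps, pvConsHead]
      · rw [if_neg (by simp [List.isPrefixOf]; exact fun h => hc h.symm)]
        simp only [List.length_cons] at hf
        rw [ih n (c :: cur) acc (by omega)]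
        obtain ⟨p, ps, hps⟩ : ∃ p ps, pvParts t = p :: ps := by
          cases hpt : pvParts t with
          | nil => exact absurd hpt (pvParts_ne_nil t)
          | cons p ps => exact ⟨p, ps, rfl⟩
        simp [pvParts, hc, hps, pvConsHead]

theorem splitOn_eq (l : List Char) :
    PySem.Chars.splitOn l ['-'] = pvParts l := by
  simp only [PySem.Chars.splitOn]
  rw [splitOn_go_eq' l (l.length + 1) [] [] (by omega)]
  obtain ⟨p, ps, hps⟩ : ∃ p ps, pvParts l = p :: ps := by
    cases hpl : pvParts l with
    | nil => exact absurd hpl (pvParts_ne_nil l)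
    | cons p ps => exact ⟨p, ps, rfl⟩
  simp [hps, pvConsHead]

theorem inter_eq_glue (cs : List Char) : ∀ (k : Nat),
    pvInter k cs = pvGlue k (pvParts (cs.map pvRepl)) := by
  induction cs with
  | nil => intro k; simp [pvInter, pvParts, pvGlue, pvGlueRest]
  | cons c t ih =>
    intro k
    obtain ⟨p, ps, hps⟩ : ∃ p ps, pvParts (t.map pvRepl) = p :: ps := by
      cases hpt : pvParts (t.map pvRepl) with
      | nil => exact absurd hpt (pvParts_ne_nil _)
      | cons p ps => exact ⟨p, ps, rfl⟩
    by_cases hc : (c == '-' || c == ' ') = true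
    · have hrep : pvRepl c = '-' := by
        rcases (by simpa using hc : c = '-' ∨ c = ' ') with h | h <;> subst h <;> rfl
      simp only [pvInter, hc, if_pos, List.map_cons, hrep, pvParts, BEq.rfl, if_pos, hps]
      rw [ih (k + 1)]
      simp [pvGlue, pvGlueRest, hps]
    · have hrep : pvRepl c = c := by
        simp only [pvRepl]
        rw [if_neg (by simp at hc; simp [hc.2])]
      have hcd : (pvRepl c == '-') = false := by
        rw [hrep]; simp at hc ⊢; exact hc.1
      simp only [pvInter, hc, List.map_cons, pvParts, hcd, Bool.false_eq_true,
        if_false, hps]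
      rw [ih k]
      simp [pvGlue, hps, hrep]

theorem parts_length (cs : List Char) :
    (pvParts (cs.map pvRepl)).length = cs.countP (fun c => c == '-' || c == ' ') + 1 := by
  induction cs with
  | nil => simp [pvParts]
  | cons c t ih =>
    obtain ⟨p, ps, hps⟩ : ∃ p ps, pvParts (t.map pvRepl) = p :: ps := by
      cases hpt : pvParts (t.map pvRepl) with
      | nil => exact absurd hpt (pvParts_ne_nil _)
      | cons p ps => exact ⟨p, ps, rfl⟩
    by_cases hc : (c == '-' || c == ' ') = true
    · have hrep : pvRepl c = '-' := by
        rcases (by simpa using hc : c = '-' ∨ c = ' ') with h | h <;> subst h <;> rfl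
      simp only [List.map_cons, hrep, pvParts, BEq.rfl, if_pos, List.length_cons,
        List.countP_cons, hc]
      omega
    · have hrep : pvRepl c = c := by
        simp only [pvRepl]
        rw [if_neg (by simp at hc; simp [hc.2])]
      have hcd : (pvRepl c == '-') = false := by
        rw [hrep]; simp at hc ⊢; exact hc.1
      simp only [List.map_cons, pvParts, hcd, Bool.false_eq_true, if_false, hps,
        List.length_cons, List.countP_cons, hc]
      rw [hps] at ih
      simp at ih ⊢
      omega

theorem foldB_eq (ps : List (List Char)) : ∀ (k : Nat) (s0 : List Char),
    k + ps.length ≤ 3 →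
    (PySem.List.enumerate ps (k : Int)).foldl
      (fun (st : Option (List Char)) ip =>
        st.bind (fun s => (PySem.List.pyGet? pvYMDalt ip.1).map (fun u => s ++ u ++ ip.2)))
      (some s0)
    = some (s0 ++ pvGlueRest k ps) := by
  induction ps with
  | nil => intro k s0 _; simp [PySem.List.enumerate, pvGlueRest]
  | cons q qs ih =>
    intro k s0 h
    rw [PySem.List.enumerate_cons]
    have hk3 : k < 3 := by simp at h; omega
    have hget : PySem.List.pyGet? pvYMDalt (k : Int) = some (pvYMD.getD k []) := by
      have : pvYMDalt = pvYMD := rfl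
      rw [this]; exact pvYMD_get k hk3
    simp only [List.foldl_cons, Option.bind_some, hget, Option.map_some]
    have harg : ((k : Int) + 1) = (((k + 1 : Nat)) : Int) := by push_cast; ring
    rw [harg, ih (k + 1) _ (by simp at h; omega)]
    simp [pvGlueRest]

-- ===== VERDICT (by name: the statement is the Claim_ definition above) =====
theorem MakeaStringtoTime_spec : Claim_equal_MakeaStringtoTime := by
  intro Time _ hpre
  have hpre' : Time.toList.countP (fun c => c == '-' || c == ' ') ≤ 3 := hpre
  unfold Spec_MakeaStringtoTime MakeaStringtoTime MakeaStringtoTime_alt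
  simp only [replace_eq, splitOn_eq]
  have hA := foldA_eq Time.toList 0 [] (by omega)
  simp only [Nat.cast_zero, Nat.zero_add, List.nil_append] at hA
  rw [hA]
  obtain ⟨p, ps, hps⟩ : ∃ p ps, pvParts (Time.toList.map pvRepl) = p :: ps := by
    cases hpt : pvParts (Time.toList.map pvRepl) with
    | nil => exact absurd hpt (pvParts_ne_nil _)
    | cons p ps => exact ⟨p, ps, rfl⟩
  have hlen : ps.length ≤ 3 := by
    have := parts_length Time.toList
    rw [hps] at this; simp at this; omega
  rw [hps]
  have hB := foldB_eq ps 0 p (by omega)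
  simp only [Nat.cast_zero, List.append_assoc] at hB
  have hig := inter_eq_glue Time.toList 0
  rw [hps] at hig
  simp only [pvGlue] at hig
  simp [hB, hig]
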